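-- pv_equiv track=rewrite | github.com/DonnaOftadeh/Nextify_Notion | app/agents.py | _anchor_lines
-- ===== SOURCE A (Python) =====
-- from typing import Dict, Any, Callable, List, Tuple
--
-- def _anchor_lines(section_text: str) -> List[str]:
--     """Short anchors (first H2 + first table header) to maintain consistency without copying."""
--     anchors: List[str] = []
--     for ln in (section_text or "").splitlines():
--         s = ln.strip()
--         if s.startswith("## "):
--             anchors.append(s[3:][:160]); break
--     for ln in (section_text or "").splitlines():
--         s = ln.strip()
--         if s.startswith("|") and s.endswith("|") and "---" in s:
--             anchors.append(s[:160]); break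
--     return anchors[:2]
-- ===== SOURCE B (Python) =====
-- def _anchor_lines(section_text):
--     """Single pass over the lines, filling two optional slots; assembles H2-then-table at the end."""
--     h2 = None
--     tbl = None
--     for ln in (section_text or "").splitlines():
--         s = ln.strip()
--         if h2 is None and s.startswith("## "):
--             h2 = s[3:][:160]
--         if tbl is None and s.startswith("|") and s.endswith("|") and "---" in s:
--             tbl = s[:160]
--     out = []
--     if h2 is not None:
--         out.append(h2)
--     if tbl is not None:
--         out.append(tbl)
--     return out
-- ===== Notes on version B (the rewrite author's own statement) =====
-- stated objective: alternative
-- what changed: Replaces A's two full scans of the split lines (one per anchor, each with append-and-break) with a single pass maintaining two optional slots (first H2, first table header), assembling the H2-then-table result at the end.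
import Mathlib
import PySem

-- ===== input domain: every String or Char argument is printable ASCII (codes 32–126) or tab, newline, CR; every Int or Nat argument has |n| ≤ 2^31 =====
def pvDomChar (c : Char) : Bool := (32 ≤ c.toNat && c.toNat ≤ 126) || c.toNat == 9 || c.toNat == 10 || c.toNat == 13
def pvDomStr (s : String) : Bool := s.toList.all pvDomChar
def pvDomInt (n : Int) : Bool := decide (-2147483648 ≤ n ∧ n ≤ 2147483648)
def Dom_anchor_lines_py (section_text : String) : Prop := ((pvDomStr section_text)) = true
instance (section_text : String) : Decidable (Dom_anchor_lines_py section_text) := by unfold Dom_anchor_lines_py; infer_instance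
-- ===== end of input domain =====

-- B is a single pass over the lines filling two optional slots instead of A's two scans; return value only, no side effects.

-- ===== PORT A =====
-- first loop of A: scan for the first H2 line, append-and-break
def pvScanH2 : List String → List String
  | [] => []
  | ln :: rest =>
    let s := PySem.Str.strip ln
    if PySem.Str.startswith s "## " then
      [PySem.Str.slice (PySem.Str.slice s (some 3) none) none (some 160)]
    else pvScanH2 rest

-- second loop of A: scan for the first table-header line, append-and-break
def pvScanTbl : List String → List String
  | [] => []
  | ln :: rest =>
    let s := PySem.Str.strip ln
    if PySem.Str.startswith s "|" && PySem.Str.endswith s "|" && PySem.Str.isIn "---" s then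
      [PySem.Str.slice s none (some 160)]
    else pvScanTbl rest

def anchor_lines_py (section_text : String) : List String :=
  let anchors := pvScanH2 (PySem.Str.splitlines section_text)
      ++ pvScanTbl (PySem.Str.splitlines section_text)
  PySem.List.slice anchors none (some 2)

-- ===== PORT B =====
-- one step of B's single pass: fill whichever optional slot is still empty
def pvStep (st : Option String × Option String) (ln : String) : Option String × Option String :=
  let s := PySem.Str.strip ln
  let h2 := if st.1.isNone && PySem.Str.startswith s "## " then
      some (PySem.Str.slice (PySem.Str.slice s (some 3) none) none (some 160))
    else st.1
  let tbl := if st.2.isNone && (PySem.Str.startswith s "|" && PySem.Str.endswith s "|" && PySem.Str.isIn "---" s) then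
      some (PySem.Str.slice s none (some 160))
    else st.2
  (h2, tbl)

def anchor_lines_py_alt (section_text : String) : List String :=
  let r := (PySem.Str.splitlines section_text).foldl pvStep (none, none)
  r.1.toList ++ r.2.toList

-- ===== PRECONDITION & SPEC =====
def Spec_anchor_lines_py (section_text : String) (out : List String) : Prop := out = anchor_lines_py_alt section_text
instance (section_text : String) (out : List String) : Decidable (Spec_anchor_lines_py section_text out) := by unfold Spec_anchor_lines_py; infer_instance

-- ===== CLAIM (what is proved, stated in full; the proofs are below) =====
def Claim_equal_anchor_lines_py : Prop := ∀ (section_text : String), Dom_anchor_lines_py section_text → Spec_anchor_lines_py section_text (anchor_lines_py section_text)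

-- ===== LEMMAS AND PROOFS =====

lemma pvScanH2_len (lines : List String) : (pvScanH2 lines).length ≤ 1 := by
  induction lines with
  | nil => simp [pvScanH2]
  | cons ln rest ih => simp only [pvScanH2]; split <;> simp [ih]

lemma pvScanTbl_len (lines : List String) : (pvScanTbl lines).length ≤ 1 := by
  induction lines with
  | nil => simp [pvScanTbl]
  | cons ln rest ih => simp only [pvScanTbl]; split <;> simp [ih]

lemma head?_toList_of_len_le_one {α : Type} (l : List α) (h : l.length ≤ 1) :
    l.head?.toList = l := by
  match l with
  | [] => rfl
  | [x] => rfl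
  | x :: y :: t => simp at h

lemma pvFold_spec (lines : List String) (a b : Option String) :
    lines.foldl pvStep (a, b) =
      (a.or (pvScanH2 lines).head?, b.or (pvScanTbl lines).head?) := by
  induction lines generalizing a b with
  | nil => simp [pvScanH2, pvScanTbl]
  | cons ln rest ih =>
    cases a <;> cases b <;>
      simp only [List.foldl_cons, pvStep, pvScanH2, pvScanTbl, Option.isNone_none,
        Option.isNone_some, Bool.false_and, Bool.true_and] <;>
      rw [ih] <;>
      split_ifs <;>
      simp_all [Option.or]

lemma pvTake2 (xs : List String) (h : xs.length ≤ 2) :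
    PySem.List.slice xs none (some (2 : Int)) = xs := by
  rw [show (2 : Int) = ((2 : Nat) : Int) from rfl, PySem.List.slice_to_natCast]
  exact List.take_of_length_le (by simpa using h)

-- ===== VERDICT (by name: the statement is the Claim_ definition above) =====
theorem anchor_lines_py_spec : Claim_equal_anchor_lines_py := by
  intro t _
  unfold Spec_anchor_lines_py anchor_lines_py anchor_lines_py_alt
  rw [pvFold_spec]
  simp only [Option.none_or]
  rw [head?_toList_of_len_le_one _ (pvScanH2_len _),
      head?_toList_of_len_le_one _ (pvScanTbl_len _)]
  exact pvTake2 _ (by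
    have := pvScanH2_len (PySem.Str.splitlines t)
    have := pvScanTbl_len (PySem.Str.splitlines t)
    simp only [List.length_append]; omega)
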